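-- pv_equiv track=rewrite | github.com/WSANsudo/RAECM | model/training/simple_classifier.py | clean_prediction
-- ===== SOURCE A (Python) =====
-- def clean_prediction(predicted_label: str) -> str:
--     """
--     清理模型预测输出，移除特殊标记和重复内容
--
--     处理情况：
--     - ios<|im_end|>ios<| -> ios
--     - routerosiosios-xeios-rxjunosnetgear -> routeros (取第一个有效标签)
--     - junosjunosjunosjunos -> junos
--     """
--     # 1. 移除所有特殊标记
--     special_tokens = ['<|im_end|>', '<|im_start|>', '<|endoftext|>', '<|startoftext|>',
--                       '<|end|>', '<|eot_id|>', '<|im', '<|end_of_text|>', '<|begin_of_text|>',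
--                       '<|start_header_id|>', '<|end_header_id|>', '<|']
--     for token in special_tokens:
--         predicted_label = predicted_label.replace(token, '')
--
--     # 2. 取第一行
--     predicted_label = predicted_label.split('\n')[0].strip()
--
--     # 3. 如果为空，返回
--     if not predicted_label:
--         return predicted_label
--
--     # 4. 检测并处理重复模式（如 iosiosios -> ios）
--     # 尝试找到最短的重复单元
--     for length in range(1, len(predicted_label) // 2 + 1):
--         unit = predicted_label[:length]
--         # 检查是否整个字符串都是这个单元的重复
--         if predicted_label == unit * (len(predicted_label) // length) + unit[:len(predicted_label) % length]:
--             # 如果是纯重复，返回单元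
--             if len(predicted_label) % length == 0:
--                 return unit
--
--     # 5. 处理混合重复（如 routerosiosios-xe... -> 取第一个词）
--     # 常见标签列表
--     known_labels = [
--         # OS
--         'routeros', 'ios', 'ios-xe', 'ios-xr', 'nx-os', 'junos', 'vrp', 'fortios',
--         'dsm', 'qts', 'unifi', 'arubaos', 'pan-os', 'linux', 'windows', 'freebsd', 'openbsd',
--         # Vendor
--         'mikrotik', 'cisco', 'juniper', 'huawei', 'fortinet', 'synology', 'qnap', 'ubiquiti',
--         'hpe', 'aruba', 'zyxel', 'd-link', 'netgear', 'tp-link', 'asus', 'nokia',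
--         'palo alto', 'check point', 'arista', 'extreme', 'ruckus', 'allied telesis',
--         'yamaha', 'nec', 'keenetic', 'lancom', 'sonicwall', 'brocade', 'dd-wrt',
--         # Device type
--         'router', 'switch', 'firewall', 'server', 'camera', 'nas', 'printer', 'iot', 'appliance',
--         'null'
--     ]
--
--     # 尝试从开头匹配已知标签
--     predicted_lower = predicted_label.lower()
--     for label in sorted(known_labels, key=len, reverse=True):  # 优先匹配长标签
--         if predicted_lower.startswith(label):
--             return predicted_label[:len(label)]
--
--     # 6. 如果没有匹配到已知标签，返回原始清理结果
--     return predicted_label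
-- ===== SOURCE B (Python) =====
-- def clean_prediction(predicted_label: str) -> str:
--     # 1. remove special tokens, recursively over the token list
--     special_tokens = ['<|im_end|>', '<|im_start|>', '<|endoftext|>', '<|startoftext|>',
--                       '<|end|>', '<|eot_id|>', '<|im', '<|end_of_text|>', '<|begin_of_text|>',
--                       '<|start_header_id|>', '<|end_header_id|>', '<|']
--
--     def strip_tokens(s, toks):
--         if not toks:
--             return s
--         return strip_tokens(s.replace(toks[0], ''), toks[1:])
--
--     s = strip_tokens(predicted_label, special_tokens)
--
--     # 2. first line, located with find instead of building the split list
--     nl = s.find('\n')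
--     if nl != -1:
--         s = s[:nl]
--     s = s.strip()
--
--     # 3. empty guard
--     if not s:
--         return s
--
--     # 4. collapse a pure repetition to its smallest unit via the
--     #    string-doubling minimal-period trick instead of trying every length
--     p = (s + s).find(s, 1)
--     if p <= len(s) // 2 and len(s) % p == 0:
--         return s[:p]
--
--     # 5. longest known label prefixing the lowercased string, by filter+max
--     #    instead of scanning a length-sorted copy of the label list
--     known_labels = [
--         'routeros', 'ios', 'ios-xe', 'ios-xr', 'nx-os', 'junos', 'vrp', 'fortios',
--         'dsm', 'qts', 'unifi', 'arubaos', 'pan-os', 'linux', 'windows', 'freebsd', 'openbsd',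
--         'mikrotik', 'cisco', 'juniper', 'huawei', 'fortinet', 'synology', 'qnap', 'ubiquiti',
--         'hpe', 'aruba', 'zyxel', 'd-link', 'netgear', 'tp-link', 'asus', 'nokia',
--         'palo alto', 'check point', 'arista', 'extreme', 'ruckus', 'allied telesis',
--         'yamaha', 'nec', 'keenetic', 'lancom', 'sonicwall', 'brocade', 'dd-wrt',
--         'router', 'switch', 'firewall', 'server', 'camera', 'nas', 'printer', 'iot', 'appliance',
--         'null'
--     ]
--     low = s.lower()
--     hits = [len(lab) for lab in known_labels if low.startswith(lab)]
--     if hits: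
--         return s[:max(hits)]
--     return s
-- ===== Notes on version B (the rewrite author's own statement) =====
-- stated objective: faster
-- what changed: B re-decomposes every stage: tokens are stripped by recursion over the token list, the first line is located with find(' ') instead of building the split list, A's step-4 repetition detector (try every length up to len//2 and rebuild unit*(len//length)+unit[:len%length]) is replaced by the single string-doubling minimal-period search (s+s).find(s, 1), and the known-label step filters the matching labels and takes the maximal length instead of scanning a length-sorted copy of the label list.
import Mathlib
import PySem

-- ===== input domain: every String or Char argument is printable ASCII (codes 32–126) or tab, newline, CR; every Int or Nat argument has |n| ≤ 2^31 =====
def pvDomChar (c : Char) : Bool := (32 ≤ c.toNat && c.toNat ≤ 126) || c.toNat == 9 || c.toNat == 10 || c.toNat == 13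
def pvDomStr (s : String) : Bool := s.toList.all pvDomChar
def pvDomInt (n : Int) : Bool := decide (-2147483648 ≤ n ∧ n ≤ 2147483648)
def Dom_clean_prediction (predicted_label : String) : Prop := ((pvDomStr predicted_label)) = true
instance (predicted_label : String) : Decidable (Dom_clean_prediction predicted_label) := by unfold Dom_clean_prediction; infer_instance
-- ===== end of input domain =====

-- B re-decomposes every stage: tokens are stripped by recursion over the token list, the first
-- line is cut with find('\n') instead of building the split list, the O(n²) try-every-length
-- repetition loop becomes the single string-doubling minimal-period search (s+s).find(s, 1),
-- and the known-label step filters the matching labels and takes the max length instead of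
-- scanning a length-sorted copy of the list (objective: faster step 4, alternative elsewhere).

-- shared data constants (identical literals in both Pythons)
def pvTokens : List String :=
  ["<|im_end|>", "<|im_start|>", "<|endoftext|>", "<|startoftext|>",
   "<|end|>", "<|eot_id|>", "<|im", "<|end_of_text|>", "<|begin_of_text|>",
   "<|start_header_id|>", "<|end_header_id|>", "<|"]

def pvLabels : List String :=
  ["routeros", "ios", "ios-xe", "ios-xr", "nx-os", "junos", "vrp", "fortios",
   "dsm", "qts", "unifi", "arubaos", "pan-os", "linux", "windows", "freebsd", "openbsd",
   "mikrotik", "cisco", "juniper", "huawei", "fortinet", "synology", "qnap", "ubiquiti",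
   "hpe", "aruba", "zyxel", "d-link", "netgear", "tp-link", "asus", "nokia",
   "palo alto", "check point", "arista", "extreme", "ruckus", "allied telesis",
   "yamaha", "nec", "keenetic", "lancom", "sonicwall", "brocade", "dd-wrt",
   "router", "switch", "firewall", "server", "camera", "nas", "printer", "iot", "appliance",
   "null"]

-- ===== PORT A =====
-- A's step 4: for length in range(1, len//2+1): rebuild unit*(len//length) + unit[:len%length] and compare.
-- Python string repetition unit * k is ported exactly as pyRepeat on the code-point list.
def pvLoopA (s : String) : List Int → Option String
  | [] => none
  | L :: rest =>
      let unit := PySem.Str.slice s none (some L)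
      if s = String.ofList (PySem.List.pyRepeat unit.toList (PySem.Int.floordiv (PySem.Str.len s) L))
            ++ PySem.Str.slice unit none (some (PySem.Int.mod (PySem.Str.len s) L)) then
        if PySem.Int.mod (PySem.Str.len s) L = 0 then some unit
        else pvLoopA s rest
      else pvLoopA s rest

-- A's step 5: first label of the length-sorted (descending, stable) list that prefixes the lowercased string
def pvMatchLoop (low s : String) : List String → String
  | [] => s
  | lab :: rest =>
      if PySem.Str.startswith low lab then PySem.Str.slice s none (some (PySem.Str.len lab))
      else pvMatchLoop low s rest

def clean_prediction (predicted_label : String) : String :=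
  -- steps 1-2: for token in tokens: s = s.replace(token, ''); s = s.split('\n')[0].strip()
  -- split('\n') always returns a non-empty list, so Python's [0] is exactly headI here.
  let s := PySem.Str.strip
    (((PySem.Str.split? (pvTokens.foldl (fun acc tok => PySem.Str.replace acc tok "") predicted_label) "\n").getD []).headI)
  if s = "" then s
  else
    -- the loop either returns a unit early (some) or falls through to step 5
    (pvLoopA s (PySem.List.pyRange 1 (PySem.Int.floordiv (PySem.Str.len s) 2 + 1))).getD
      (pvMatchLoop (PySem.Str.lower s) s (PySem.List.sorted pvLabels (fun lab => PySem.Str.len lab) true))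

-- ===== PORT B =====
-- B's step 1: recursive descent over the token list
def pvStripToks : List String → String → String
  | [], s => s
  | tok :: rest, s => pvStripToks rest (PySem.Str.replace s tok "")

-- B's step 5 tail: s[:max(hits)] if hits else s
def pvBestLen (s : String) : List Int → String
  | [] => s
  | h :: t => PySem.Str.slice s none (some (t.foldl max h))

def clean_prediction_alt (predicted_label : String) : String :=
  let s0 := pvStripToks pvTokens predicted_label
  -- B's step 2: nl = s.find('\n'); if nl != -1: s = s[:nl]
  let nl := PySem.Str.find s0 "\n"
  let s := PySem.Str.strip (if nl = -1 then s0 else PySem.Str.slice s0 none (some nl))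
  if s = "" then s
  else
    -- B's step 4: p = (s+s).find(s, 1); if p <= len//2 and len % p == 0: return s[:p]
    let p := PySem.Str.findFrom (s ++ s) s 1
    if p ≤ PySem.Int.floordiv (PySem.Str.len s) 2 ∧ PySem.Int.mod (PySem.Str.len s) p = 0 then
      PySem.Str.slice s none (some p)
    else
      -- B's step 5: hits = [len(lab) for lab in known_labels if low.startswith(lab)]; s[:max(hits)] if hits
      pvBestLen s ((pvLabels.filter (fun lab => PySem.Str.startswith (PySem.Str.lower s) lab)).map
              (fun lab => PySem.Str.len lab))

-- ===== PRECONDITION & SPEC =====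
def Spec_clean_prediction (predicted_label : String) (out : String) : Prop := out = clean_prediction_alt predicted_label
instance (predicted_label : String) (out : String) : Decidable (Spec_clean_prediction predicted_label out) := by unfold Spec_clean_prediction; infer_instance

-- ===== CLAIM (what is proved, stated in full; the proofs are below) =====
def Claim_equal_clean_prediction : Prop := ∀ (predicted_label : String), Dom_clean_prediction predicted_label → Spec_clean_prediction predicted_label (clean_prediction predicted_label)

-- ===== LEMMAS AND PROOFS =====

-- step 1: the recursion over the token list is the fold
theorem pvStripToks_eq (toks : List String) (s : String) :
    pvStripToks toks s = toks.foldl (fun acc tok => PySem.Str.replace acc tok "") s := by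
  induction toks generalizing s with
  | nil => rfl
  | cons t rest ih => simp [pvStripToks, ih]

-- step 2: the first piece of split('\n') is the prefix before the first '\n'
theorem pvGo_headI_of_acc (sep : List Char) (a : List Char) :
    ∀ (fuel : Nat) (l cur : List Char) (acc : List (List Char)),
      (PySem.Chars.splitOn.go sep fuel l cur (acc ++ [a])).headI = a := by
  intro fuel
  induction fuel with
  | zero =>
      intro l cur acc
      simp [PySem.Chars.splitOn.go]
  | succ fuel ih =>
      intro l cur acc
      match l with
      | [] => simp [PySem.Chars.splitOn.go]
      | c :: rest =>
          rw [PySem.Chars.splitOn.go]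
          split
          · have : PySem.Chars.splitOn.go sep fuel (List.drop sep.length (c :: rest)) []
                (cur.reverse :: (acc ++ [a]))
                = PySem.Chars.splitOn.go sep fuel (List.drop sep.length (c :: rest)) []
                  ((cur.reverse :: acc) ++ [a]) := by rw [List.cons_append]
            rw [this, ih]
          · exact ih rest (c :: cur) acc

theorem pvGo_headI : ∀ (fuel : Nat) (l cur : List Char), l.length < fuel →
    (PySem.Chars.splitOn.go ['\n'] fuel l cur []).headI
      = cur.reverse ++ l.takeWhile (· != '\n') := by
  intro fuel
  induction fuel with
  | zero => intro l cur h; omega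
  | succ fuel ih =>
      intro l cur h
      match l with
      | [] => simp [PySem.Chars.splitOn.go]
      | c :: rest =>
          rw [PySem.Chars.splitOn.go]
          by_cases hc : c = '\n'
          · rw [if_pos (by simp [List.isPrefixOf, hc])]
            have := pvGo_headI_of_acc ['\n'] cur.reverse fuel
              (List.drop ['\n'].length (c :: rest)) [] []
            simp only [List.nil_append] at this
            rw [this, List.takeWhile_cons_of_neg (by simp [hc]), List.append_nil]
          · rw [if_neg (by simp [List.isPrefixOf]; intro h'; exact hc h'.symm)]
            rw [ih rest (c :: cur) (by simpa using Nat.lt_of_succ_lt_succ h)]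
            rw [List.takeWhile_cons_of_pos (by simp [hc])]
            simp

theorem pvTakeWhile_eq_take (c : Char) :
    ∀ (l : List Char) (k : Nat), l[k]? = some c → (∀ i < k, l[i]? ≠ some c) →
      l.takeWhile (· != c) = l.take k := by
  intro l
  induction l with
  | nil => intro k hk _; simp at hk
  | cons a t ih =>
      intro k hk hmin
      match k with
      | 0 =>
          simp at hk
          rw [hk, List.takeWhile_cons_of_neg (by simp), List.take_zero]
      | k + 1 =>
          have ha : a ≠ c := by
            have := hmin 0 (by omega)
            simpa using this
          rw [List.takeWhile_cons_of_pos (by simp [ha]), List.take_succ_cons]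
          rw [ih k (by simpa using hk) (fun i hi => by
            have := hmin (i + 1) (by omega)
            simpa using this)]

theorem pvFirstLine_eq (x : String) :
    ((PySem.Str.split? x "\n").getD []).headI
      = (if PySem.Str.find x "\n" = -1 then x
         else PySem.Str.slice x none (some (PySem.Str.find x "\n"))) := by
  have hsep : ("\n" : String).toList = ['\n'] := by decide
  have hlhs : ((PySem.Str.split? x "\n").getD []).headI
      = String.ofList ((PySem.Chars.splitOn x.toList ['\n']).headI) := by
    rw [PySem.Str.split?, hsep, PySem.Chars.split?]
    simp only [List.isEmpty_cons, if_neg Bool.false_ne_true, Option.map_some, Option.getD_some]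
    match PySem.Chars.splitOn x.toList ['\n'] with
    | [] => rfl
    | p :: ps => rfl
  rw [hlhs, PySem.Chars.splitOn,
    pvGo_headI (x.toList.length + 1) x.toList [] (by omega), List.reverse_nil, List.nil_append]
  by_cases hf : PySem.Str.find x "\n" = -1
  · rw [if_pos hf]
    rw [PySem.Str.find, hsep] at hf
    have hni : ¬ ['\n'] <:+: x.toList := (PySem.Chars.find_eq_neg_one_iff _ _).mp hf
    have hmem : '\n' ∉ x.toList := by
      intro hm
      exact hni ((List.singleton_infix_iff '\n' x.toList).mpr hm)
    rw [List.takeWhile_eq_self_iff.mpr (fun y hy => by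
      simp only [bne_iff_ne, ne_eq]
      intro h; exact hmem (h ▸ hy))]
    exact String.ofList_toList
  · rw [if_neg hf]
    rw [PySem.Str.find, hsep] at hf ⊢
    have hge : 0 ≤ PySem.Chars.find x.toList ['\n'] := by
      have := PySem.Chars.neg_one_le_find (s := x.toList) (sub := ['\n'])
      omega
    obtain ⟨hpre, hmin⟩ := PySem.Chars.find_spec hge
    set k := (PySem.Chars.find x.toList ['\n']).toNat with hk
    have hgetk : x.toList[k]? = some '\n' := by
      obtain ⟨t, ht⟩ := hpre
      rw [← List.head?_drop, ← ht]
      simp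
    have hmin' : ∀ i < k, x.toList[i]? ≠ some '\n' := by
      intro i hi hcon
      apply hmin i hi
      rw [← List.head?_drop] at hcon
      cases hd : x.toList.drop i with
      | nil => rw [hd] at hcon; simp at hcon
      | cons y t =>
          rw [hd] at hcon
          simp only [List.head?_cons, Option.some.injEq] at hcon
          exact ⟨t, by simp [hcon]⟩
    rw [pvTakeWhile_eq_take '\n' x.toList k hgetk hmin']
    rw [PySem.Str.slice]
    congr 1
    rw [PySem.Chars.slice_eq_listSlice]
    have : PySem.Chars.find x.toList ['\n'] = ((k : Nat) : Int) :=
      (Int.toNat_of_nonneg hge).symm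
    rw [this, PySem.List.slice_to_natCast]

-- step 5: the first match in the descending length-sorted list picks the maximal matching length
theorem pvBestLen_perm (s : String) {M N : List Int} (hp : M.Perm N) :
    pvBestLen s M = pvBestLen s N := by
  match M, N, hp.length_eq with
  | [], [], _ => rfl
  | h :: t, h' :: t', _ =>
    show PySem.Str.slice s none (some (t.foldl max h)) = PySem.Str.slice s none (some (t'.foldl max h'))
    have hM := PySem.List.le_foldl_max t h
    have hN := PySem.List.le_foldl_max t' h'
    have hmemM : t.foldl max h ∈ h :: t := by
      rcases PySem.List.foldl_max_mem t h with h1 | h1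
      · rw [h1]; exact List.mem_cons_self
      · exact List.mem_cons_of_mem _ h1
    have hmemN : t'.foldl max h' ∈ h' :: t' := by
      rcases PySem.List.foldl_max_mem t' h' with h1 | h1
      · rw [h1]; exact List.mem_cons_self
      · exact List.mem_cons_of_mem _ h1
    have hboundM : ∀ y ∈ h :: t, y ≤ t.foldl max h := by
      intro y hy; rcases List.mem_cons.mp hy with rfl | hy
      · exact hM.1
      · exact hM.2 y hy
    have hboundN : ∀ y ∈ h' :: t', y ≤ t'.foldl max h' := by
      intro y hy; rcases List.mem_cons.mp hy with rfl | hy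
      · exact hN.1
      · exact hN.2 y hy
    have : t.foldl max h = t'.foldl max h' :=
      le_antisymm (hboundN _ (hp.mem_iff.mp hmemM)) (hboundM _ (hp.symm.mem_iff.mp hmemN))
    rw [this]

theorem pvMatch_sorted (low s : String) :
    ∀ (L : List String), L.Pairwise (fun a b => PySem.Str.len b ≤ PySem.Str.len a) →
      pvMatchLoop low s L
        = pvBestLen s ((L.filter (fun lab => PySem.Str.startswith low lab)).map
            (fun lab => PySem.Str.len lab)) := by
  intro L
  induction L with
  | nil => intro _; rfl
  | cons lab rest ih =>
      intro hpw
      rw [List.pairwise_cons] at hpw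
      by_cases hm : PySem.Str.startswith low lab = true
      · rw [pvMatchLoop, if_pos hm, List.filter_cons_of_pos hm, List.map_cons, pvBestLen]
        have hmax := PySem.List.le_foldl_max ((rest.filter (fun lab => PySem.Str.startswith low lab)).map
            (fun lab => PySem.Str.len lab)) (PySem.Str.len lab)
        have heq : ((rest.filter (fun lab => PySem.Str.startswith low lab)).map
            (fun lab => PySem.Str.len lab)).foldl max (PySem.Str.len lab) = PySem.Str.len lab := by
          rcases PySem.List.foldl_max_mem ((rest.filter (fun lab => PySem.Str.startswith low lab)).map
              (fun lab => PySem.Str.len lab)) (PySem.Str.len lab) with h1 | h1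
          · exact h1
          · obtain ⟨b, hb, hbl⟩ := List.mem_map.mp h1
            have hbr : b ∈ rest := List.mem_of_mem_filter hb
            exact le_antisymm (by rw [← hbl]; exact hpw.1 b hbr) hmax.1
        rw [heq]
      · rw [pvMatchLoop, if_neg hm, List.filter_cons_of_neg (by simpa using hm)]
        exact ih hpw.2

theorem pvMatch_eq (low s : String) (K : List String) :
    pvMatchLoop low s (PySem.List.sorted K (fun lab => PySem.Str.len lab) true)
      = pvBestLen s ((K.filter (fun lab => PySem.Str.startswith low lab)).map
                (fun lab => PySem.Str.len lab)) := by
  rw [pvMatch_sorted low s _ (PySem.List.sorted_pairwise_rev K (fun lab => PySem.Str.len lab))]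
  exact pvBestLen_perm s
    (((PySem.List.sorted_perm K (fun lab => PySem.Str.len lab) true).filter _).map _)

-- step 4: minimal rotation machinery (shared by both directions of the period argument)
def pvRotP (l : List Char) (i : Nat) : Prop := l.drop i ++ l.take i = l

theorem pv_occ_iff {l : List Char} {i : Nat} (h : i ≤ l.length) :
    l <+: (l ++ l).drop i ↔ pvRotP l i := by
  rw [List.drop_append_of_le_length h, List.prefix_iff_eq_take, pvRotP]
  have hlen : l.length = (l.drop i).length + i := by simp; omega
  rw [hlen, List.take_length_add_append]
  exact eq_comm

theorem pvRotP_iff_rotate {l : List Char} {i : Nat} (h : i ≤ l.length) :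
    pvRotP l i ↔ l.rotate i = l := by
  rw [List.rotate_eq_drop_append_take h, pvRotP]

theorem pv_rot_mul {l : List Char} {p : Nat} (hp : l.rotate p = l) (q : Nat) :
    l.rotate (q * p) = l := by
  induction q with
  | zero => simp
  | succ q ih =>
      have := List.rotate_rotate l (q * p) p
      rw [ih, hp] at this
      rw [Nat.succ_mul]; exact this.symm

theorem pv_min_dvd {l : List Char} {p : Nat} (hp1 : 1 ≤ p) (hpn : p ≤ l.length)
    (hP : pvRotP l p) (hmin : ∀ i, 1 ≤ i → i < p → ¬ pvRotP l i) : p ∣ l.length := by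
  have hrot : l.rotate p = l := (pvRotP_iff_rotate hpn).mp hP
  have hql : l.rotate (l.length / p * p) = l := pv_rot_mul hrot _
  have hsplit : l.length / p * p + l.length % p = l.length := by rw [Nat.mul_comm]; exact Nat.div_add_mod l.length p
  have hr : l.rotate (l.length % p) = l := by
    have := List.rotate_rotate l (l.length / p * p) (l.length % p)
    rw [hql] at this
    rw [this, hsplit, List.rotate_length]
  have hrlt : l.length % p < p := Nat.mod_lt _ hp1
  by_contra hnd
  have hr1 : 1 ≤ l.length % p := by
    rcases Nat.eq_zero_or_pos (l.length % p) with h0 | h1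
    · exact absurd ((Nat.dvd_iff_mod_eq_zero ..).mpr h0) hnd
    · exact h1
  exact hmin _ hr1 hrlt ((pvRotP_iff_rotate (by omega)).mpr hr)

theorem pv_flatten_replicate_succ' (u : List Char) (k : Nat) :
    (List.replicate (k + 1) u).flatten = (List.replicate k u).flatten ++ u := by
  rw [List.replicate_succ', List.flatten_append]; simp

theorem pv_rep_of_rotP {p : Nat} :
    ∀ (k : Nat) (l : List Char), pvRotP l p → l.length = p * k →
      l = (List.replicate k (l.take p)).flatten := by
  intro k
  induction k with
  | zero => intro l _ hlen; simp at hlen ⊢; omega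
  | succ k ih =>
      intro l hC hlen
      rcases Nat.eq_zero_or_pos k with hk0 | hk1
      · subst hk0
        simp only [List.replicate_succ, List.replicate_zero, List.flatten_cons,
          List.flatten_nil, List.append_nil]
        rw [List.take_of_length_le (by omega)]
      · have hpn : p + p ≤ l.length := by nlinarith
        have hdrop_len : (l.drop p).length = l.length - p := by simp
        have htake_t : (l.drop p).take p = l.take p := by
          have hstar : l.drop p = l.take (l.length - p) := by
            have := congrArg (List.take (l.length - p)) hC
            simpa [List.take_append_of_le_length, List.length_drop,
              List.take_of_length_le] using this
          rw [hstar, List.take_take, Nat.min_def, if_pos (by omega)]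
        have hrot_t : pvRotP (l.drop p) p := by
          have hdag := congrArg (List.drop p) hC
          rw [List.drop_append_of_le_length (by simp; omega), List.drop_drop] at hdag
          show (l.drop p).drop p ++ (l.drop p).take p = l.drop p
          rw [List.drop_drop, htake_t]
          simpa [Nat.add_comm] using hdag
        have hlen_t : (l.drop p).length = p * k := by rw [List.length_drop, hlen, Nat.mul_succ]; omega
        have := ih (l.drop p) hrot_t hlen_t
        rw [htake_t] at this
        conv_lhs => rw [← List.take_append_drop p l, this]
        rw [List.replicate_succ, List.flatten_cons]

theorem pv_rotP_of_rep {l u : List Char} {k L : Nat} (hu : u.length = L)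
    (hk : 1 ≤ k) (hrep : l = (List.replicate k u).flatten) : pvRotP l L := by
  obtain ⟨k', rfl⟩ : ∃ k', k = k' + 1 := ⟨k - 1, by omega⟩
  show l.drop L ++ l.take L = l
  have hcons : l = u ++ (List.replicate k' u).flatten := by
    rw [hrep, List.replicate_succ, List.flatten_cons]
  have hdrop : l.drop L = (List.replicate k' u).flatten := by
    rw [hcons, ← hu, List.drop_left]
  have htake : l.take L = u := by
    rw [hcons, ← hu, List.take_left]
  rw [hdrop, htake, ← pv_flatten_replicate_succ', ← hrep]

def pvHit (s : String) (L : Int) : Prop :=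
  s = String.ofList (PySem.List.pyRepeat (PySem.Str.slice s none (some L)).toList
        (PySem.Int.floordiv (PySem.Str.len s) L))
      ++ PySem.Str.slice (PySem.Str.slice s none (some L)) none (some (PySem.Int.mod (PySem.Str.len s) L))
    ∧ PySem.Int.mod (PySem.Str.len s) L = 0

theorem pvLoopA_skip (s : String) (xs ys : List Int) (h : ∀ L ∈ xs, ¬ pvHit s L) :
    pvLoopA s (xs ++ ys) = pvLoopA s ys := by
  induction xs with
  | nil => rfl
  | cons L xs ih =>
      have hL := h L (by simp)
      rw [List.cons_append]
      show pvLoopA s (L :: (xs ++ ys)) = pvLoopA s ys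
      rw [pvLoopA]
      split_ifs with h1 h2
      · exact absurd ⟨h1, h2⟩ hL
      · exact ih (fun L hl => h L (by simp [hl]))
      · exact ih (fun L hl => h L (by simp [hl]))

theorem pvLoopA_none (s : String) (xs : List Int) (h : ∀ L ∈ xs, ¬ pvHit s L) :
    pvLoopA s xs = none := by
  have := pvLoopA_skip s xs [] h
  simpa using this

theorem pvLoopA_hit (s : String) (L : Int) (rest : List Int) (h : pvHit s L) :
    pvLoopA s (L :: rest) = some (PySem.Str.slice s none (some L)) := by
  rw [pvLoopA]
  simp only [if_pos h.1, if_pos h.2]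

theorem pvHit_iff (s : String) (L : Nat) :
    pvHit s (L : Int) ↔
      (L ∣ s.toList.length ∧
        s.toList = (List.replicate (s.toList.length / L) (s.toList.take L)).flatten) := by
  have hlen : PySem.Str.len s = ((s.toList.length : Nat) : Int) := PySem.Str.len_eq s
  have hmod : PySem.Int.mod (PySem.Str.len s) (L : Int)
      = ((s.toList.length % L : Nat) : Int) := by rw [hlen, PySem.Int.mod_natCast]
  have hfd : PySem.Int.floordiv (PySem.Str.len s) (L : Int)
      = ((s.toList.length / L : Nat) : Int) := by rw [hlen, PySem.Int.floordiv_natCast]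
  have hunit : (PySem.Str.slice s none (some (L : Int))).toList = s.toList.take L := by
    rw [PySem.Str.toList_slice]; exact PySem.List.slice_to_natCast _ _
  have hz : ∀ x : List Char, PySem.Chars.slice x none (some ((0:Nat):Int)) = [] := by
    intro x; simpa using PySem.List.slice_to_natCast x 0
  have hdvd_iff : PySem.Int.mod (PySem.Str.len s) (L : Int) = 0 ↔ L ∣ s.toList.length := by
    rw [hmod, Nat.cast_eq_zero]
    exact ⟨fun h => (Nat.dvd_iff_mod_eq_zero ..).mpr h, fun h => (Nat.dvd_iff_mod_eq_zero ..).mp h⟩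
  have hrepeq : (String.ofList (PySem.List.pyRepeat (PySem.Str.slice s none (some (L:Int))).toList
        (PySem.Int.floordiv (PySem.Str.len s) (L : Int)))).toList
      = (List.replicate (s.toList.length / L) (s.toList.take L)).flatten := by
    rw [String.toList_ofList, hunit, hfd]
    rw [PySem.List.pyRepeat, Int.toNat_natCast]
  unfold pvHit
  rw [hdvd_iff]
  constructor
  · rintro ⟨heq, hdvd⟩
    refine ⟨hdvd, ?_⟩
    have hm0 : s.toList.length % L = 0 := (Nat.dvd_iff_mod_eq_zero ..).mp hdvd
    have h2 := congrArg String.toList heq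
    rw [String.toList_append, hrepeq, PySem.Str.toList_slice, hmod, hm0, hz] at h2
    simpa using h2
  · rintro ⟨hdvd, hrep⟩
    have hm0 : s.toList.length % L = 0 := (Nat.dvd_iff_mod_eq_zero ..).mp hdvd
    refine ⟨?_, hdvd⟩
    apply String.toList_inj.mp
    rw [String.toList_append, hrepeq, PySem.Str.toList_slice, hmod, hm0, hz]
    simpa using hrep

-- step 4: A's loop over every candidate length and B's single minimal-period test agree,
-- for an arbitrary common fallback X (the step-5 value of each port)
theorem pv_core (s : String) (hs : s ≠ "") (X : String) :
    (pvLoopA s (PySem.List.pyRange 1 (PySem.Int.floordiv (PySem.Str.len s) 2 + 1))).getD X =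
    (if PySem.Str.findFrom (s ++ s) s 1 ≤ PySem.Int.floordiv (PySem.Str.len s) 2 ∧
        PySem.Int.mod (PySem.Str.len s) (PySem.Str.findFrom (s ++ s) s 1) = 0 then
       PySem.Str.slice s none (some (PySem.Str.findFrom (s ++ s) s 1))
     else X) := by
  have hnil : s.toList ≠ [] := by
    intro h; exact hs (by simpa using String.toList_inj.mp (by simp [h]))
  have hn : 1 ≤ s.toList.length := List.length_pos_of_ne_nil hnil
  set l := s.toList with hl
  set n := l.length with hnn
  have hff : PySem.Str.findFrom (s ++ s) s 1 = PySem.Chars.findFrom (l ++ l) l ((1:Nat):Int) := by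
    simp [PySem.Str.findFrom_eq, String.toList_append, ← hl]
  set F := PySem.Chars.findFrom (l ++ l) l ((1:Nat):Int) with hFdef
  have hlen2 : n ≤ (l ++ l).length := by simp [hnn]
  have hoccn : l <+: (l ++ l).drop n := by
    refine (pv_occ_iff le_rfl).mpr ?_
    show l.drop n ++ l.take n = l
    simp [hnn]
  have hne : F ≠ -1 := by
    intro hc
    rw [hFdef, PySem.Chars.findFrom_natCast_eq_neg_one_iff (l ++ l) l 1 (by simp; omega)] at hc
    apply hc
    have hdd : (l ++ l).drop n = ((l ++ l).drop 1).drop (n - 1) := by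
      rw [List.drop_drop]; congr 1; omega
    rw [hdd] at hoccn
    exact hoccn.isInfix.trans (List.drop_suffix _ _).isInfix
  obtain ⟨hF1, hFpre, hFmin⟩ :=
    PySem.Chars.findFrom_natCast_spec (l ++ l) l 1 (by simp; omega) hne
  set P := F.toNat with hPdef
  have hF0 : (0:Int) ≤ F := le_trans (by norm_num) hF1
  have hFP : F = (P : Int) := (Int.toNat_of_nonneg hF0).symm
  have hP1 : 1 ≤ P := by omega
  have hPn : P ≤ n := by
    by_contra hc
    exact hFmin n hn (by omega) hoccn
  have hCp : pvRotP l P := (pv_occ_iff hPn).mp hFpre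
  have hminP : ∀ i, 1 ≤ i → i < P → ¬ pvRotP l i := by
    intro i h1 h2 hC
    exact hFmin i h1 h2 ((pv_occ_iff (by omega)).mpr hC)
  have hdvd : P ∣ n := pv_min_dvd hP1 hPn hCp hminP
  have hm0 : n % P = 0 := (Nat.dvd_iff_mod_eq_zero ..).mp hdvd
  have hlen : PySem.Str.len s = (n : Int) := PySem.Str.len_eq s
  have hfd2 : PySem.Int.floordiv (PySem.Str.len s) 2 = ((n / 2 : Nat) : Int) := by
    rw [hlen]; exact_mod_cast PySem.Int.floordiv_natCast n 2
  have hmodF : PySem.Int.mod (PySem.Str.len s) F = ((n % P : Nat) : Int) := by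
    rw [hlen, hFP]; exact PySem.Int.mod_natCast _ _
  by_cases hle : P ≤ n / 2
  · have hcondB : PySem.Str.findFrom (s ++ s) s 1 ≤ PySem.Int.floordiv (PySem.Str.len s) 2 ∧
        PySem.Int.mod (PySem.Str.len s) (PySem.Str.findFrom (s ++ s) s 1) = 0 := by
      rw [hff, hfd2, hmodF, hFP]
      exact ⟨by exact_mod_cast hle, by rw [hm0]; norm_num⟩
    rw [if_pos hcondB]
    have hnohit : ∀ L ∈ PySem.List.pyRange 1 (P : Int), ¬ pvHit s L := by
      intro L hL hhit
      obtain ⟨hL1, hLP⟩ := PySem.List.mem_pyRange_one.mp hL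
      have hLnn : L = ((L.toNat : Nat) : Int) := (Int.toNat_of_nonneg (by omega)).symm
      rw [hLnn, pvHit_iff s L.toNat] at hhit
      obtain ⟨hdvdL, hrepL⟩ := hhit
      have h1L : 1 ≤ L.toNat := by omega
      have hLP' : L.toNat < P := by omega
      have hk1 : 1 ≤ n / L.toNat := (Nat.one_le_div_iff (by omega)).mpr (by omega)
      have hu : (l.take L.toNat).length = L.toNat := by
        rw [List.length_take]; omega
      exact hminP L.toNat h1L hLP' (pv_rotP_of_rep hu hk1 hrepL)
    have hsplit : PySem.List.pyRange 1 (PySem.Int.floordiv (PySem.Str.len s) 2 + 1)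
        = PySem.List.pyRange 1 (P : Int) ++ PySem.List.pyRange (P : Int) (PySem.Int.floordiv (PySem.Str.len s) 2 + 1) := by
      rw [hfd2]
      exact PySem.List.pyRange_one_append 1 (P : Int) _ (by exact_mod_cast hP1) (by push_cast; omega)
    have hhitP : pvHit s (P : Int) := by
      rw [pvHit_iff s P]
      refine ⟨hdvd, pv_rep_of_rotP (n / P) l hCp ?_⟩
      rw [← hnn, Nat.mul_div_cancel' hdvd]
    have hcons : PySem.List.pyRange (P : Int) (PySem.Int.floordiv (PySem.Str.len s) 2 + 1)
        = (P : Int) :: PySem.List.pyRange ((P : Int) + 1) (PySem.Int.floordiv (PySem.Str.len s) 2 + 1) := by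
      rw [hfd2]
      exact PySem.List.pyRange_one_cons (by push_cast; omega)
    rw [hsplit, pvLoopA_skip s _ _ hnohit, hcons, pvLoopA_hit s _ _ hhitP]
    rw [hff, hFP]; rfl
  · have hcondB : ¬ (PySem.Str.findFrom (s ++ s) s 1 ≤ PySem.Int.floordiv (PySem.Str.len s) 2 ∧
        PySem.Int.mod (PySem.Str.len s) (PySem.Str.findFrom (s ++ s) s 1) = 0) := by
      rintro ⟨hc, -⟩
      rw [hff, hfd2, hFP] at hc
      exact hle (by exact_mod_cast hc)
    rw [if_neg hcondB]
    have hnohit : ∀ L ∈ PySem.List.pyRange 1 (PySem.Int.floordiv (PySem.Str.len s) 2 + 1), ¬ pvHit s L := by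
      intro L hL hhit
      rw [hfd2] at hL
      obtain ⟨hL1, hLb⟩ := PySem.List.mem_pyRange_one.mp hL
      have hLb' : L.toNat ≤ n / 2 := by omega
      have hLnn : L = ((L.toNat : Nat) : Int) := (Int.toNat_of_nonneg (by omega)).symm
      rw [hLnn, pvHit_iff s L.toNat] at hhit
      obtain ⟨hdvdL, hrepL⟩ := hhit
      have h1L : 1 ≤ L.toNat := by omega
      have hLn : L.toNat ≤ n := le_trans hLb' (Nat.div_le_self _ _)
      have hk1 : 1 ≤ n / L.toNat := (Nat.one_le_div_iff (by omega)).mpr hLn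
      have hu : (l.take L.toNat).length = L.toNat := by
        rw [List.length_take]; omega
      exact hminP L.toNat h1L (by omega) (pv_rotP_of_rep hu hk1 hrepL)
    rw [pvLoopA_none s _ hnohit]; rfl

-- the whole pipeline after cleaning, as a function of the cleaned string s
theorem pv_tail (s : String) :
    (if s = "" then s
     else
       (pvLoopA s (PySem.List.pyRange 1 (PySem.Int.floordiv (PySem.Str.len s) 2 + 1))).getD
         (pvMatchLoop (PySem.Str.lower s) s (PySem.List.sorted pvLabels (fun lab => PySem.Str.len lab) true)))
    = (if s = "" then s
       else
         if PySem.Str.findFrom (s ++ s) s 1 ≤ PySem.Int.floordiv (PySem.Str.len s) 2 ∧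
             PySem.Int.mod (PySem.Str.len s) (PySem.Str.findFrom (s ++ s) s 1) = 0 then
           PySem.Str.slice s none (some (PySem.Str.findFrom (s ++ s) s 1))
         else
           pvBestLen s ((pvLabels.filter (fun lab => PySem.Str.startswith (PySem.Str.lower s) lab)).map
                   (fun lab => PySem.Str.len lab))) := by
  by_cases h : s = ""
  · rw [if_pos h, if_pos h]
  · rw [if_neg h, if_neg h]
    refine (pv_core s h (pvMatchLoop (PySem.Str.lower s) s
      (PySem.List.sorted pvLabels (fun lab => PySem.Str.len lab) true))).trans ?_
    congr 1
    exact pvMatch_eq (PySem.Str.lower s) s pvLabels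

-- ===== VERDICT (by name: the statement is the Claim_ definition above) =====
set_option maxRecDepth 8192 in
theorem clean_prediction_spec : Claim_equal_clean_prediction := by
  intro pl _
  show clean_prediction pl = clean_prediction_alt pl
  unfold clean_prediction clean_prediction_alt
  rw [pvStripToks_eq, pvFirstLine_eq]
  exact pv_tail _
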